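-- pv_equiv track=rewrite | github.com/chadireoroonu/2025_ALGORITHM | 12/P23_p_17681.py | solution
-- ===== SOURCE A (Python) =====
-- def solution(n, arr1, arr2):
--     answer = []
--
--     def trans(m): # 10진수 -> 2진수 변환
--         result = [0] * n
--
--         # 뒷자리부터 나머지 기록
--         for i in range(n):
--             result[- i - 1] = m % 2
--             m //= 2
--
--         return result
--
--
--     for i in range(len(arr1)): # arr1 길이만큼 반복
--     	# arr1, arr2 i 번째 수 2진수 변환 결과
--         one, two = trans(arr1[i]), trans(arr2[i])
--         sol = '' # 최종 결과 저장 변수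
--
--         # 각 자리수에 대해 벽 여부 확인, 최종 결과 기록, 추가
--         for j in range(n):
--             sol += '#' if one[j] or two[j] else ' '
--
--         answer.append(sol)
--
--     return answer
-- ===== SOURCE B (Python) =====
-- def solution(n, arr1, arr2):
--     mask = (1 << n) - 1
--     answer = []
--     for a, b in zip(arr1, arr2):
--         row = format((a | b) & mask, '0{}b'.format(n))
--         answer.append(row.replace('1', '#').replace('0', ' '))
--     return answer
-- ===== Notes on version B (the rewrite author's own statement) =====
-- stated objective: idiomatic
-- what changed: A converts each pair of numbers into two n-slot bit arrays by repeated %2 and //=2 and then ORs the arrays slot by slot while concatenating the row string; B never touches individual bits: it masks a|b to its low n bits once, renders that single integer as a zero-padded binary string with format(v, '0{n}b'), and turns digits into wall characters with two str.replace calls. Constant-factor speedup measured: the per-bit work moves from interpreted Python loops into C-level int or/format/str.replace.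
-- outside the precondition, e.g. on solution(0, [3], [5]): A returns [''], B returns [' ']; on solution(-2, [3], [5]): A returns [''], B raises ValueError
import Mathlib
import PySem

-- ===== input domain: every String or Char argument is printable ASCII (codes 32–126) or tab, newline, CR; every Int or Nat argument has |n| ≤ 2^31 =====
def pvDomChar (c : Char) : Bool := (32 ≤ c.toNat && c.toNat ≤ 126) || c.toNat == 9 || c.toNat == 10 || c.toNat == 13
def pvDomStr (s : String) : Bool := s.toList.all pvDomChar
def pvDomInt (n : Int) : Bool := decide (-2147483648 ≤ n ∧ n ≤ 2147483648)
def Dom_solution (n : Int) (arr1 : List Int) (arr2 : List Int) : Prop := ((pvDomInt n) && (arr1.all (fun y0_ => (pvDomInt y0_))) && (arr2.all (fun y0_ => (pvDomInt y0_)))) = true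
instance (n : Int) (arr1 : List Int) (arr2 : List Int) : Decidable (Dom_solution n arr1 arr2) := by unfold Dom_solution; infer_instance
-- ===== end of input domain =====

-- B drops A's per-bit machinery (two n-slot bit arrays built by repeated %2 and //=2,
-- then an index-wise OR loop concatenating a string): it masks a|b to the low n bits
-- once, renders that ONE number as a zero-padded binary string with format(), and maps
-- digits to wall characters with two str.replace calls; objective: idiomatic.
-- Equivalence is about the return value; neither program mutates its arguments.

-- ===== PORT A =====
-- trans(m): result = [0]*n; for i in range(n): result[-i-1] = m % 2; m //= 2
def solutionTrans (n : Int) (m : Int) : List Int :=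
  ((PySem.List.pyRange 0 n 1).foldl
    (fun st i =>
      (PySem.List.pySetD st.1 (-i - 1) (PySem.Int.mod st.2 2),
       PySem.Int.floordiv st.2 2))
    (List.replicate n.toNat 0, m)).1

def solution (n : Int) (arr1 : List Int) (arr2 : List Int) : List String :=
  (PySem.List.pyRange 0 (arr1.length : Int) 1).foldl
    (fun answer i =>
      let one := solutionTrans n ((PySem.List.pyGet? arr1 i).getD 0)
      -- arr2[i] raises IndexError when i ≥ len(arr2); Pre_solution excludes that
      let two := solutionTrans n ((PySem.List.pyGet? arr2 i).getD 0)
      let sol := (PySem.List.pyRange 0 n 1).foldl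
        (fun sol j =>
          sol ++ [if (PySem.List.pyGetD one j 0 ≠ 0 ∨ PySem.List.pyGetD two j 0 ≠ 0)
                  then '#' else ' ']) ([] : List Char)
      answer ++ [String.mk sol]) []

-- ===== PORT B =====
-- digits of bin(v), most significant first; fuel = v makes the recursion structural
def solutionBinAux : Nat → Nat → List Char
  | _, 0 => []
  | 0, _ + 1 => []   -- unreachable: fuel ≥ v throughout
  | fuel + 1, v + 1 =>
      solutionBinAux fuel ((v + 1) / 2) ++ [if (v + 1) % 2 = 1 then '1' else '0']

def solutionBinChars (v : Nat) : List Char := solutionBinAux v v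

def solutionPad (w : Nat) (v : Nat) : List Char :=
  let ds := if v = 0 then ['0'] else solutionBinChars v
  List.replicate (w - ds.length) '0' ++ ds

-- port of format(v, '0{}b'.format(n)): exact for 0 ≤ v (always true after the mask)
-- and 1 ≤ n (Pre_solution)
def solutionFormatBin (v : Int) (w : Nat) : String := String.mk (solutionPad w v.toNat)

def solution_alt (n : Int) (arr1 : List Int) (arr2 : List Int) : List String :=
  -- (1 << n) raises ValueError for n < 0; Pre_solution gives 1 ≤ n, so n.toNat is exact
  let mask : Int := ((1 : Int) <<< n.toNat) - 1
  (arr1.zip arr2).foldl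
    (fun answer p =>
      let v := PySem.Int.band (PySem.Int.bor p.1 p.2) mask
      let row := solutionFormatBin v n.toNat
      answer ++ [PySem.Str.replace (PySem.Str.replace row "1" "#") "0" " "]) []

-- ===== PRECONDITION & SPEC =====
-- Pre_ excludes len(arr1) > len(arr2), where A raises IndexError at arr2[i], and n ≤ 0
-- (outside the problem's natural domain of n-column maps): there B's '(1 << n)' raises
-- ValueError for n < 0, and for n = 0 B's zero-width format field renders v = 0 as '0'
-- (one ' ' per row) while A returns empty-string rows.
def Pre_solution (n : Int) (arr1 : List Int) (arr2 : List Int) : Prop :=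
  1 ≤ n ∧ arr1.length ≤ arr2.length
instance (n : Int) (arr1 : List Int) (arr2 : List Int) : Decidable (Pre_solution n arr1 arr2) := by unfold Pre_solution; infer_instance

def pvWitness_solution : Int × List Int × List Int := (2, [9, 20], [30, 1])

def Spec_solution (n : Int) (arr1 : List Int) (arr2 : List Int) (out : List String) : Prop := out = solution_alt n arr1 arr2
instance (n : Int) (arr1 : List Int) (arr2 : List Int) (out : List String) : Decidable (Spec_solution n arr1 arr2 out) := by unfold Spec_solution; infer_instance

-- ===== CLAIM (what is proved, stated in full; the proofs are below) =====
def Claim_equal_solution : Prop := ∀ (n : Int) (arr1 : List Int) (arr2 : List Int), Dom_solution n arr1 arr2 → Pre_solution n arr1 arr2 → Spec_solution n arr1 arr2 (solution n arr1 arr2)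

-- ===== LEMMAS AND PROOFS =====

-- the bits of m &&& n are a subset of the bits of m, so subtracting it is bitwise
theorem pvLandAddLdiff (m : Nat) : ∀ n : Nat, (m &&& n) + Nat.ldiff m n = m := by
  induction m using Nat.binaryRec with
  | zero => intro n; simp [Nat.ldiff, Nat.bitwise_zero_left]
  | bit a m ih =>
    intro n
    induction n using Nat.binaryRec with
    | zero =>
      show (Nat.bit a m &&& 0) + Nat.ldiff (Nat.bit a m) 0 = Nat.bit a m
      simp [Nat.ldiff, Nat.bitwise_zero_right]
    | bit b n _ =>
      rw [Nat.land_bit, Nat.ldiff_bit]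
      have h := ih n
      cases a <;> cases b <;>
        simp only [Nat.bit, Bool.and_true, Bool.and_false, Bool.not_true,
          Bool.not_false, cond_true, cond_false] <;> omega

theorem pvSubLand (m n : Nat) : m - (m &&& n) = Nat.ldiff m n := by
  have := pvLandAddLdiff m n; omega

-- PySem's Python-exact `|` agrees with Mathlib's Int.lor
theorem pvBorEqLor (a b : Int) : PySem.Int.bor a b = Int.lor a b := by
  have key : ∀ k : Nat, (-(Int.negSucc k) - 1).toNat = k := by
    intro k; rw [Int.negSucc_eq]; omega
  cases a with
  | ofNat m =>
    cases b with
    | ofNat n => simp [PySem.Int.bor, Int.lor]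
    | negSucc n =>
      have hl : Int.lor (Int.ofNat m) (Int.negSucc n) = Int.negSucc (Nat.ldiff n m) := rfl
      simp only [Int.ofNat_eq_natCast] at hl ⊢
      rw [PySem.Int.bor, if_pos (Int.natCast_nonneg m), if_neg (by omega), key, hl]
      rw [Int.toNat_natCast, pvSubLand, Int.negSucc_eq]; ring
  | negSucc m =>
    cases b with
    | ofNat n =>
      have hl : Int.lor (Int.negSucc m) (Int.ofNat n) = Int.negSucc (Nat.ldiff m n) := rfl
      simp only [Int.ofNat_eq_natCast] at hl ⊢
      rw [PySem.Int.bor, if_neg (by omega), if_pos (Int.natCast_nonneg n), key, hl]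
      rw [Int.toNat_natCast, pvSubLand, Int.negSucc_eq]; ring
    | negSucc n =>
      have hl : Int.lor (Int.negSucc m) (Int.negSucc n) = Int.negSucc (m &&& n) := rfl
      rw [PySem.Int.bor, if_neg (by omega), if_neg (by omega), key, key, hl]
      rw [Int.negSucc_eq]; ring

-- PySem's Python-exact `&` agrees with Mathlib's Int.land
theorem pvBandEqLand (a b : Int) : PySem.Int.band a b = Int.land a b := by
  have key : ∀ k : Nat, (-(Int.negSucc k) - 1).toNat = k := by
    intro k; rw [Int.negSucc_eq]; omega
  cases a with
  | ofNat m =>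
    cases b with
    | ofNat n => simp [PySem.Int.band, Int.land]
    | negSucc n =>
      have hl : Int.land (Int.ofNat m) (Int.negSucc n) = Int.ofNat (Nat.ldiff m n) := rfl
      simp only [Int.ofNat_eq_natCast] at hl ⊢
      rw [PySem.Int.band, if_pos (Int.natCast_nonneg m), if_neg (by omega), key, hl]
      rw [Int.toNat_natCast, pvSubLand]
  | negSucc m =>
    cases b with
    | ofNat n =>
      have hl : Int.land (Int.negSucc m) (Int.ofNat n) = Int.ofNat (Nat.ldiff n m) := rfl
      simp only [Int.ofNat_eq_natCast] at hl ⊢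
      rw [PySem.Int.band, if_neg (by omega), if_pos (Int.natCast_nonneg n), key, hl]
      rw [Int.toNat_natCast, pvSubLand]
    | negSucc n =>
      have hl : Int.land (Int.negSucc m) (Int.negSucc n) = Int.negSucc (m ||| n) := rfl
      rw [PySem.Int.band, if_neg (by omega), if_neg (by omega), key, key, hl]
      rw [Int.negSucc_eq]; ring

theorem pvLandOfNatNonneg (x : Int) (m : Nat) : 0 ≤ Int.land x (Int.ofNat m) := by
  cases x with
  | ofNat k =>
    have h : Int.land (Int.ofNat k) (Int.ofNat m) = Int.ofNat (k &&& m) := rfl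
    rw [h]; exact Int.ofNat_nonneg _
  | negSucc k =>
    have h : Int.land (Int.negSucc k) (Int.ofNat m) = Int.ofNat (Nat.ldiff m k) := rfl
    rw [h]; exact Int.ofNat_nonneg _

-- the low bit of x >> k is Int.testBit x k
theorem pvModShiftTestBit (x : Int) (k : Nat) :
    (PySem.Int.mod (x >>> k) 2 ≠ 0) ↔ Int.testBit x k := by
  have ht : ∀ m : Nat, m.testBit k = (m >>> k % 2 == 1) := by
    intro m
    rw [Nat.testBit, Nat.and_comm, Nat.and_one_is_mod]
    rcases Nat.mod_two_eq_zero_or_one (m >>> k) with h2 | h2 <;> simp [h2]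
  cases x with
  | ofNat m =>
    have h : (Int.ofNat m) >>> k = Int.ofNat (m >>> k) := rfl
    rw [h, Int.testBit, PySem.Int.mod_eq_emod_of_pos (by norm_num), ht,
      Int.ofNat_eq_natCast]
    simp only [ne_eq, beq_iff_eq]
    omega
  | negSucc m =>
    have h : (Int.negSucc m) >>> k = Int.negSucc (m >>> k) := rfl
    rw [h, Int.testBit, PySem.Int.mod_eq_emod_of_pos (by norm_num), ht,
      Int.negSucc_eq]
    simp only [ne_eq, Bool.not_eq_eq_eq_not, Bool.not_true, beq_eq_false_iff_ne]
    omega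

-- Python's (1 << w) - 1 as a Nat mask
theorem pvMask (w : Nat) : (((1 : Int) <<< w) - 1) = Int.ofNat (2 ^ w - 1) := by
  have h : (1:Nat) ≤ 2 ^ w := Nat.one_le_two_pow
  rw [Int.ofNat_eq_natCast, Nat.cast_sub h, Nat.cast_pow]
  simp [Int.shiftLeft_eq]

-- bit k of (x & ((1 << w) - 1)).toNat
theorem pvBitMasked (x : Int) (w k : Nat) :
    (PySem.Int.band x (((1 : Int) <<< w) - 1)).toNat.testBit k
      = (Int.testBit x k && decide (k < w)) := by
  rw [pvMask, pvBandEqLand]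
  have h0 : 0 ≤ Int.land x (Int.ofNat (2 ^ w - 1)) := pvLandOfNatNonneg x _
  have h1 : Int.ofNat (Int.land x (Int.ofNat (2 ^ w - 1))).toNat
      = Int.land x (Int.ofNat (2 ^ w - 1)) := by
    rw [Int.ofNat_eq_natCast]; exact Int.toNat_of_nonneg h0
  have h2 : (Int.land x (Int.ofNat (2 ^ w - 1))).toNat.testBit k
      = Int.testBit (Int.ofNat ((Int.land x (Int.ofNat (2 ^ w - 1))).toNat)) k := rfl
  rw [h2, h1, Int.testBit_land]
  have h3 : Int.testBit (Int.ofNat (2 ^ w - 1)) k = (2 ^ w - 1).testBit k := rfl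
  rw [h3, Nat.testBit_two_pow_sub_one]

theorem pvMaskedLt (x : Int) (w : Nat) :
    (PySem.Int.band x (((1 : Int) <<< w) - 1)).toNat < 2 ^ w := by
  apply Nat.lt_pow_two_of_testBit
  intro i hi
  rw [pvBitMasked]
  simp [Nat.not_lt.mpr hi]

-- fuel irrelevance for the binary-digit renderer
theorem pvBinAuxIrrel : ∀ (fuel fuel' v : Nat), v ≤ fuel → v ≤ fuel' →
    solutionBinAux fuel v = solutionBinAux fuel' v := by
  intro fuel
  induction fuel with
  | zero =>
    intro fuel' v hv _
    interval_cases v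
    cases fuel' <;> rfl
  | succ f ih =>
    intro fuel' v hv hv'
    cases v with
    | zero => cases fuel' <;> rfl
    | succ u =>
      cases fuel' with
      | zero => omega
      | succ f' =>
        show solutionBinAux f ((u + 1) / 2) ++ _ = solutionBinAux f' ((u + 1) / 2) ++ _
        rw [ih f' ((u + 1) / 2) (by omega) (by omega)]

theorem pvBinCharsSucc (v : Nat) (hv : 1 ≤ v) :
    solutionBinChars v
      = solutionBinChars (v / 2) ++ [if v % 2 = 1 then '1' else '0'] := by
  obtain ⟨u, rfl⟩ : ∃ u, v = u + 1 := ⟨v - 1, by omega⟩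
  show solutionBinAux (u + 1) (u + 1) = _
  show solutionBinAux u ((u + 1) / 2) ++ _ = _
  rw [solutionBinChars, pvBinAuxIrrel u ((u + 1) / 2) ((u + 1) / 2) (by omega) (by omega)]

-- peeling the last binary digit off a zero-padded rendering
theorem pvPadSucc (w v : Nat) (hw : 1 ≤ w) :
    solutionPad (w + 1) v
      = solutionPad w (v / 2) ++ [if v % 2 = 1 then '1' else '0'] := by
  have hrep : List.replicate w '0' = List.replicate (w - 1) '0' ++ ['0'] := by
    conv_lhs => rw [show w = (w - 1) + 1 by omega]
    rw [List.replicate_succ']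
  have e0 : ∀ u : Nat, solutionPad u 0 = List.replicate (u - 1) '0' ++ ['0'] := by
    intro u; simp [solutionPad]
  by_cases h0 : v = 0
  · subst h0
    rw [Nat.zero_div, e0, e0, Nat.add_sub_cancel, hrep, List.append_assoc]
    norm_num
  · by_cases h1 : v / 2 = 0
    · have hv1 : v = 1 := by omega
      subst hv1
      have hb : solutionBinChars 1 = ['1'] := rfl
      have e1 : solutionPad (w + 1) 1 = List.replicate w '0' ++ ['1'] := by
        simp [solutionPad, hb]
      rw [e1, h1, e0, hrep, List.append_assoc]
      norm_num
    · simp only [solutionPad, if_neg h0, if_neg h1, pvBinCharsSucc v (by omega : 1 ≤ v),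
        List.length_append, List.length_cons, List.length_nil]
      rw [show w + 1 - ((solutionBinChars (v / 2)).length + (0 + 1))
          = w - (solutionBinChars (v / 2)).length by omega, List.append_assoc]

-- the zero-padded rendering of v < 2^w lists v's bits, most significant first
theorem pvPad (w : Nat) : ∀ v : Nat, 0 < w → v < 2 ^ w →
    solutionPad w v
      = (List.range w).map (fun j => if v.testBit (w - 1 - j) then '1' else '0') := by
  induction w with
  | zero => omega
  | succ w ih =>
    intro v _ hv
    by_cases hw0 : w = 0
    · subst hw0
      interval_cases v <;> decide
    · have h2 : 2 ^ (w + 1) = 2 ^ w * 2 := by rw [Nat.pow_succ]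
      rw [pvPadSucc w v (by omega), ih (v / 2) (by omega) (by omega),
        List.range_succ, List.map_append, List.map_singleton]
      congr 1
      · apply List.map_congr_left
        intro j hj
        rw [List.mem_range] at hj
        rw [Nat.testBit_div_two]
        have : w - 1 - j + 1 = w + 1 - 1 - j := by omega
        rw [this]
      · have h0 : w + 1 - 1 - w = 0 := by omega
        rw [h0, Nat.testBit_zero]
        rcases Nat.mod_two_eq_zero_or_one v with h | h <;> simp [h]

-- str.replace with one-char pattern and replacement is a character map
theorem pvGoSingle (o x : Char) : ∀ (l : List Char) (fuel : Nat) (acc : List Char),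
    l.length ≤ fuel →
    PySem.Chars.replace.go [o] [x] fuel l acc
      = acc.reverse ++ l.map (fun c => if c = o then x else c) := by
  intro l
  induction l with
  | nil =>
    intro fuel acc _
    cases fuel <;> simp [PySem.Chars.replace.go]
  | cons c t ih =>
    intro fuel acc h
    cases fuel with
    | zero => simp at h
    | succ f =>
      conv_lhs => rw [PySem.Chars.replace.go]
      have hpre : [o].isPrefixOf (c :: t) = (o == c) := by simp [List.isPrefixOf]
      by_cases hc : o = c
      · rw [if_pos (by simp [hpre, hc])]
        have hd : List.drop ([o].length) (c :: t) = t := by simp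
        have ha : ([x].reverse ++ acc) = x :: acc := rfl
        rw [hd, ha, ih f (x :: acc) (by simp at h; omega)]
        simp [hc.symm]
      · rw [if_neg (by simp [hpre, hc])]
        rw [ih f (c :: acc) (by simp at h; omega)]
        have hco : (c = o) = False := eq_false (fun h' => hc h'.symm)
        simp [hco]

theorem pvReplaceSingle (o x : Char) (l : List Char) :
    PySem.Chars.replace l [o] [x] = l.map (fun c => if c = o then x else c) := by
  rw [PySem.Chars.replace]
  simp only [List.isEmpty_cons, Bool.false_eq_true, if_false]
  rw [pvGoSingle o x l l.length [] le_rfl]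
  simp

theorem pvSetNeg {α : Type} (xs : List α) (k : Nat) (v : α) (h1 : 0 < k) (h2 : k ≤ xs.length) :
    PySem.List.pySetD xs (-(k:Int)) v = xs.set (xs.length - k) v := by
  have hk : ((-(-(k:Int))).toNat) = k := by omega
  rw [PySem.List.pySetD, PySem.List.pySet?, PySem.List.pyIdx?,
    if_neg (by omega), if_pos (by omega), hk]
  rfl

theorem pvFloordivShift (y : Int) : PySem.Int.floordiv y 2 = y >>> (1:Nat) := by
  rw [PySem.Int.floordiv_eq_ediv_of_pos (by norm_num)]
  cases y with
  | ofNat m =>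
    have h : (Int.ofNat m) >>> (1:Nat) = Int.ofNat (m >>> 1) := rfl
    rw [h]; simp [Int.ofNat_eq_natCast, Nat.shiftRight_one]
  | negSucc m =>
    have h : (Int.negSucc m) >>> (1:Nat) = Int.negSucc (m >>> 1) := rfl
    rw [h, Int.negSucc_eq, Int.negSucc_eq, Nat.shiftRight_one]; omega

theorem pvShiftAdd (x : Int) (a b : Nat) : (x >>> a) >>> b = x >>> (a + b) := by
  cases x with
  | ofNat m =>
    show Int.ofNat ((m >>> a) >>> b) = Int.ofNat (m >>> (a + b))
    rw [Nat.shiftRight_add]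
  | negSucc m =>
    show Int.negSucc ((m >>> a) >>> b) = Int.negSucc (m >>> (a + b))
    rw [Nat.shiftRight_add]

theorem pvShiftZero (x : Int) : x >>> (0:Nat) = x := by
  cases x <;> rfl

-- A's trans loop after t of its n iterations: the last t slots are filled, m is shifted
theorem pvTransLoop (n m : Int) : ∀ (t : Nat), (t : Int) ≤ n →
    (PySem.List.pyRange 0 (t : Int) 1).foldl
      (fun st i =>
        (PySem.List.pySetD st.1 (-i - 1) (PySem.Int.mod st.2 2),
         PySem.Int.floordiv st.2 2))
      (List.replicate n.toNat 0, m)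
    = (List.ofFn (n := n.toNat)
        (fun p => if n.toNat - t ≤ (p : Nat)
                  then PySem.Int.mod (m >>> (n.toNat - 1 - (p : Nat))) 2 else 0),
       m >>> t) := by
  intro t
  induction t with
  | zero =>
    intro _
    rw [Nat.cast_zero, PySem.List.pyRange_one_eq_nil (by omega), List.foldl_nil]
    refine Prod.ext ?_ (pvShiftZero m).symm
    apply List.ext_getElem (by simp)
    intro p hp _
    simp only [List.getElem_replicate, List.getElem_ofFn]
    rw [if_neg (by simp at hp; omega)]
  | succ t ih =>
    intro ht
    have ht' : (t : Int) ≤ n := by push_cast at ht ⊢; omega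
    have hcast : ((t + 1 : Nat) : Int) = (t : Int) + 1 := by push_cast; ring
    rw [hcast, PySem.List.pyRange_one_succ_right (by positivity), List.foldl_append,
      ih ht', List.foldl_cons, List.foldl_nil]
    have hlen : (List.ofFn (n := n.toNat)
        (fun p => if n.toNat - t ≤ (p : Nat)
                  then PySem.Int.mod (m >>> (n.toNat - 1 - (p : Nat))) 2 else 0)).length = n.toNat := by
      simp
    have hidx : -(t:Int) - 1 = -(((t+1 : Nat)):Int) := by push_cast; ring
    refine Prod.ext ?_ ?_
    · show PySem.List.pySetD _ (-(t:Int) - 1) (PySem.Int.mod (m >>> t) 2) = _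
      rw [hidx, pvSetNeg _ (t+1) _ (by omega) (by rw [hlen]; omega), hlen]
      apply List.ext_getElem (by simp)
      intro p hp hp'
      simp only [List.length_set] at hp
      rw [List.getElem_set, List.getElem_ofFn]
      simp only [Fin.val_mk]
      simp only [List.length_ofFn] at hp'
      by_cases hpe : n.toNat - (t+1) = p
      · rw [if_pos hpe, List.getElem_ofFn]
        simp only [Fin.val_mk]
        rw [if_pos (by omega)]
        have : n.toNat - 1 - p = t := by omega
        rw [this]
      · rw [if_neg hpe, List.getElem_ofFn]
        simp only [Fin.val_mk]
        by_cases hc : n.toNat - t ≤ p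
        · rw [if_pos hc, if_pos (by omega)]
        · rw [if_neg hc, if_neg (by omega)]
    · show PySem.Int.floordiv (m >>> t) 2 = m >>> (t + 1)
      rw [pvFloordivShift, pvShiftAdd]

-- slot j of trans(m) is bit n-1-j of m
theorem pvTransGet (n m j : Int) (h0 : 0 ≤ j) (h1 : j < n) :
    PySem.List.pyGetD (solutionTrans n m) j 0
      = PySem.Int.mod (m >>> (n - 1 - j).toNat) 2 := by
  have hn : n = ((n.toNat : Nat) : Int) := by omega
  rw [solutionTrans, hn, pvTransLoop _ m n.toNat (by omega)]
  simp only [Int.toNat_natCast]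
  rw [PySem.List.pyGetD_eq_getElem _ _ h0 (by simp; omega)]
  rw [List.getElem_ofFn]
  simp only [Fin.val_mk]
  rw [if_pos (by omega)]
  have h2 : n.toNat - 1 - j.toNat = (n - 1 - j).toNat := by omega
  rw [h2, ← hn]

-- the per-row strings of A and B agree
theorem pvRowEq (n a b : Int) (hn : 1 ≤ n) :
    (PySem.List.pyRange 0 n 1).map
      (fun j => if (PySem.List.pyGetD (solutionTrans n a) j 0 ≠ 0 ∨
                    PySem.List.pyGetD (solutionTrans n b) j 0 ≠ 0)
                then '#' else ' ')
    = PySem.Chars.replace (PySem.Chars.replace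
        (solutionPad n.toNat
          (PySem.Int.band (PySem.Int.bor a b) (((1 : Int) <<< n.toNat) - 1)).toNat)
        ['1'] ['#']) ['0'] [' '] := by
  rw [pvReplaceSingle, pvReplaceSingle, List.map_map,
    pvPad n.toNat _ (by omega) (pvMaskedLt _ _), List.map_map,
    PySem.List.pyRange_one 0 n]
  rw [List.map_map]
  have hlen : (n - 0).toNat = n.toNat := by omega
  rw [hlen]
  apply List.map_congr_left
  intro k hk
  rw [List.mem_range] at hk
  have hkn : (k : Int) < n := by omega
  simp only [Function.comp_apply, zero_add]
  rw [pvTransGet n a k (by omega) hkn, pvTransGet n b k (by omega) hkn]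
  have hidx : (n - 1 - (k : Int)).toNat = n.toNat - 1 - k := by omega
  rw [hidx]
  have hbit : ((PySem.Int.band (PySem.Int.bor a b) (((1 : Int) <<< n.toNat) - 1)).toNat.testBit
      (n.toNat - 1 - k)) = true
      ↔ (PySem.Int.mod (a >>> (n.toNat - 1 - k)) 2 ≠ 0 ∨
         PySem.Int.mod (b >>> (n.toNat - 1 - k)) 2 ≠ 0) := by
    rw [pvBitMasked, pvBorEqLor, Int.testBit_lor, pvModShiftTestBit, pvModShiftTestBit]
    have : n.toNat - 1 - k < n.toNat := by omega
    simp [this]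
  by_cases hb : (PySem.Int.band (PySem.Int.bor a b) (((1 : Int) <<< n.toNat) - 1)).toNat.testBit
      (n.toNat - 1 - k) = true
  · rw [if_pos (hbit.mp hb), if_pos hb]
    decide
  · rw [if_neg (fun hp => hb (hbit.mpr hp)), if_neg hb]
    decide

-- ===== VERDICT (by name: the statement is the Claim_ definition above) =====
theorem solution_spec : Claim_equal_solution := by
  intro n arr1 arr2 _ hpre
  obtain ⟨hn, hp⟩ := hpre
  show solution n arr1 arr2 = solution_alt n arr1 arr2
  rw [solution, solution_alt]
  simp only [PySem.List.foldl_append_singleton_eq_map, List.nil_append]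
  rw [PySem.List.pyRange_one 0 (arr1.length : Int), List.map_map]
  apply List.ext_getElem (by simp; omega)
  intro i hi hi'
  simp only [List.length_map, List.length_range] at hi
  rw [List.getElem_map, List.getElem_map, List.getElem_range, List.getElem_zip]
  simp only [Function.comp_apply, zero_add]
  have h1 : (PySem.List.pyGet? arr1 (i : Int)).getD 0 = arr1[i]'(by omega) := by
    rw [PySem.List.pyGet?_natCast, List.getElem?_eq_getElem (by omega)]; rfl
  have h2 : (PySem.List.pyGet? arr2 (i : Int)).getD 0 = arr2[i]'(by omega) := by
    rw [PySem.List.pyGet?_natCast, List.getElem?_eq_getElem (by omega)]; rfl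
  rw [h1, h2]
  apply String.toList_inj.mp
  have hmk : ∀ l : List Char, (String.mk l).toList = l := fun l => Eq.symm (String.ofList_eq.mp rfl)
  rw [PySem.Str.toList_replace, PySem.Str.toList_replace]
  have h3 : (solutionFormatBin
      (PySem.Int.band (PySem.Int.bor (arr1[i]'(by omega)) (arr2[i]'(by omega)))
        (((1 : Int) <<< n.toNat) - 1)) n.toNat).toList
      = solutionPad n.toNat
          (PySem.Int.band (PySem.Int.bor (arr1[i]'(by omega)) (arr2[i]'(by omega)))
            (((1 : Int) <<< n.toNat) - 1)).toNat := by
    simp only [solutionFormatBin]; exact hmk _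
  rw [h3]
  have h4 : ("1" : String).toList = ['1'] := rfl
  have h5 : ("#" : String).toList = ['#'] := rfl
  have h6 : ("0" : String).toList = ['0'] := rfl
  have h7 : (" " : String).toList = [' '] := rfl
  rw [h4, h5, h6, h7]
  have h8 : (String.mk ((PySem.List.pyRange 0 n 1).map
      (fun j => if (PySem.List.pyGetD (solutionTrans n (arr1[i]'(by omega))) j 0 ≠ 0 ∨
                    PySem.List.pyGetD (solutionTrans n (arr2[i]'(by omega))) j 0 ≠ 0)
                then '#' else ' '))).toList
      = (PySem.List.pyRange 0 n 1).map
      (fun j => if (PySem.List.pyGetD (solutionTrans n (arr1[i]'(by omega))) j 0 ≠ 0 ∨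
                    PySem.List.pyGetD (solutionTrans n (arr2[i]'(by omega))) j 0 ≠ 0)
                then '#' else ' ') := hmk _
  rw [h8]
  exact pvRowEq n _ _ hn
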